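-- pv_equiv track=rewrite | github.com/lundal/carp-vhdl | modules/fitness/twiddle_generator.py | binary_of_width
-- ===== SOURCE A (Python) =====
-- def binary_of_width(number, width):
--     negate = number < 0
--     if negate:
--         number = -1 - number
--     representation = "{0:0"+str(width)+"b}"
--     binary = representation.format(number)
--     if negate:
--         binary = "".join(["0" if i=="1" else "1" for i in binary])
--     return binary;
-- ===== SOURCE B (Python) =====
-- def binary_of_width(number, width):
--     v = number if number >= 0 else -1 - number
--     bits = []
--     while True:
--         v, r = divmod(v, 2)
--         bits.append(r)
--         if v == 0:
--             break
--     if number >= 0: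
--         digits = ["01"[b] for b in bits]
--     else:
--         digits = ["10"[b] for b in bits]
--     while len(digits) < width:
--         digits.append("1" if number < 0 else "0")
--     digits.reverse()
--     return "".join(digits)
-- ===== Notes on version B (the rewrite author's own statement) =====
-- stated objective: alternative
-- what changed: Replaces the format-string call (msb-first conversion, left zero-pad, then a whole-string flip pass for negatives) by a single lsb-first divmod loop that emits already-flipped digits, appends padding at the end, and reverses once.
-- outside the precondition, e.g. on binary_of_width(5, -1): A raises ValueError, B returns '101'
import Mathlib
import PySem

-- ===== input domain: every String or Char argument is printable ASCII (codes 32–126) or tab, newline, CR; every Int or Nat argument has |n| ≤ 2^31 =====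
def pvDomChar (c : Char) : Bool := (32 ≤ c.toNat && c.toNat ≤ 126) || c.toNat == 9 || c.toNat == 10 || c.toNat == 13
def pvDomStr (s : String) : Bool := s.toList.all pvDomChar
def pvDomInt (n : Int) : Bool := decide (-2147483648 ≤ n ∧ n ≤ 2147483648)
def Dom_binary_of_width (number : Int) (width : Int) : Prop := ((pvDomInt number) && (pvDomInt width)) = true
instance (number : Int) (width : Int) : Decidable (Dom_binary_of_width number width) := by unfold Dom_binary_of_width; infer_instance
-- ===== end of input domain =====

-- B replaces the format-string call by a direct lsb-first divmod loop that emits already-flipped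
-- digits and appends padding before one final reverse (objective: alternative decomposition, same O(width) cost).

-- ===== PORT A =====
-- exact port of "{0:0<w>b}".format(n) for n ≥ 0, w ≥ 0 (the only uses reached here inside Pre_):
-- minimal msb-first binary digits of n, zero-padded on the left to width w
def fmtBin (n : Nat) : List Char :=
  if _h : n < 2 then [if n = 1 then '1' else '0']
  else fmtBin (n / 2) ++ [if n % 2 = 1 then '1' else '0']
termination_by n
decreasing_by exact Nat.div_lt_self (by omega) (by omega)

def binary_of_width (number : Int) (width : Int) : String :=
  let negate := number < 0
  let number := if negate then -1 - number else number
  -- representation = "{0:0"+str(width)+"b}"; binary = representation.format(number)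
  let s := fmtBin number.toNat
  let binary := List.replicate (width.toNat - s.length) '0' ++ s
  let binary := if negate then binary.map (fun i => if i = '1' then '0' else '1') else binary
  String.ofList binary

-- ===== PORT B =====
-- while True: v, r = divmod(v, 2); bits.append(r); if v == 0: break
def bitsB (v : Nat) : List Nat :=
  if _h : v / 2 = 0 then [v % 2] else v % 2 :: bitsB (v / 2)
termination_by v
decreasing_by exact Nat.div_lt_self (by omega) (by omega)

-- while len(digits) < width: digits.append(c)
def padTo (w : Nat) (ds : List Char) (c : Char) : List Char :=
  if ds.length < w then padTo w (ds ++ [c]) c else ds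
termination_by w - ds.length
decreasing_by simp; omega

def binary_of_width_alt (number : Int) (width : Int) : String :=
  let v := if 0 ≤ number then number else -1 - number
  let bits := bitsB v.toNat
  let digits := if 0 ≤ number then bits.map (fun b => if b = 1 then '1' else '0')
                else bits.map (fun b => if b = 1 then '0' else '1')
  let digits := padTo width.toNat digits (if number < 0 then '1' else '0')
  String.ofList digits.reverse

-- ===== PRECONDITION & SPEC =====
-- Pre_ excludes negative width, on which A's format specifier "0-…b" raises ValueError.
def Pre_binary_of_width (number : Int) (width : Int) : Prop := 0 ≤ width
instance (number : Int) (width : Int) : Decidable (Pre_binary_of_width number width) := by unfold Pre_binary_of_width; infer_instance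
def pvWitness_binary_of_width : Int × Int := (-5, 8)

def Spec_binary_of_width (number : Int) (width : Int) (out : String) : Prop := out = binary_of_width_alt number width
instance (number : Int) (width : Int) (out : String) : Decidable (Spec_binary_of_width number width out) := by unfold Spec_binary_of_width; infer_instance

-- ===== CLAIM (what is proved, stated in full; the proofs are below) =====
def Claim_equal_binary_of_width : Prop := ∀ (number : Int) (width : Int), Dom_binary_of_width number width → Pre_binary_of_width number width → Spec_binary_of_width number width (binary_of_width number width)

-- ===== LEMMAS AND PROOFS =====

theorem bits_rev (m : Nat) :
    ((bitsB m).map (fun b => if b = 1 then '1' else '0')).reverse = fmtBin m := by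
  induction m using Nat.strong_induction_on with
  | _ m ih =>
    rw [bitsB, fmtBin]
    by_cases h : m / 2 = 0
    · have hm : m < 2 := by omega
      simp [h, hm]
      have : m % 2 = m := Nat.mod_eq_of_lt hm
      rw [this]
    · have hm : ¬ m < 2 := by omega
      rw [dif_neg h, dif_neg hm, List.map_cons, List.reverse_cons,
        ih (m / 2) (Nat.div_lt_self (by omega) (by omega))]

theorem flip_digit :
    (fun b => if b = 1 then '0' else '1')
      = (fun i => if i = '1' then '0' else '1') ∘ (fun b : Nat => if b = 1 then '1' else '0') := by
  funext b
  by_cases h : b = 1 <;> simp [h]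

theorem bits_rev_flip (m : Nat) :
    ((bitsB m).map (fun b => if b = 1 then '0' else '1')).reverse
      = (fmtBin m).map (fun i => if i = '1' then '0' else '1') := by
  rw [flip_digit, ← List.map_map, ← List.map_reverse, bits_rev]

theorem padTo_rev (w : Nat) (ds : List Char) (c : Char) :
    (padTo w ds c).reverse = List.replicate (w - ds.length) c ++ ds.reverse := by
  by_cases h : ds.length < w
  · rw [padTo, if_pos h]
    have ih := padTo_rev w (ds ++ [c]) c
    rw [ih]
    simp only [List.length_append, List.length_cons, List.length_nil, List.reverse_append,
      List.reverse_cons, List.reverse_nil, List.nil_append]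
    have : w - ds.length = (w - (ds.length + 1)) + 1 := by omega
    rw [this, List.replicate_succ', List.append_assoc]
  · rw [padTo, if_neg h]
    have : w - ds.length = 0 := by omega
    simp [this]
termination_by w - ds.length
decreasing_by simp; omega

-- ===== VERDICT (by name: the statement is the Claim_ definition above) =====
theorem binary_of_width_spec : Claim_equal_binary_of_width := by
  intro number width _ _
  unfold Spec_binary_of_width binary_of_width binary_of_width_alt
  by_cases hn : 0 ≤ number
  · have hneg : ¬ number < 0 := by omega
    simp only [hn, hneg, if_pos, if_false]
    rw [padTo_rev, bits_rev]
    have hlen : ((bitsB number.toNat).map (fun b => if b = 1 then '1' else '0')).length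
        = (fmtBin number.toNat).length := by
      rw [← bits_rev number.toNat, List.length_reverse]
    rw [hlen]
  · have hneg : number < 0 := by omega
    simp only [hn, hneg, if_true, if_false]
    rw [padTo_rev, bits_rev_flip]
    have hlen : ((bitsB (-1 - number).toNat).map (fun b => if b = 1 then '0' else '1')).length
        = (fmtBin (-1 - number).toNat).length := by
      rw [← List.length_reverse, bits_rev_flip, List.length_map]
    rw [hlen]
    simp only [List.map_append, List.map_replicate]
    simp
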